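-- pv_equiv track=rewrite | github.com/mikecormier/SVAFotate | svafotate/svafotate_main.py | get_overlap
-- ===== SOURCE A (Python) =====
-- def get_overlap(groupby_list):
--     ## find the amount of overlap between two sets of coordinates
--     ## expects lists comprising start and end coordinates
--     ## returns list of overlaps for each set of coordinates
--     ## used by convert_dict function
--     chunk_list = []
--     for pos_list in groupby_list:
--         s1 = pos_list[0]
--         e1 = pos_list[1]
--         s2 = pos_list[2]
--         e2 = pos_list[3]
--         size = int(e1) - int(s1)
--         chunk = 0
--         if int(s1) <= int(s2):
--             if int(e1) <= int(e2):
--                 chunk = int(e1) - int(s2)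
--             elif int(e1) > int(e2):
--                 chunk = int(e2) - int(s2)
--         elif int(s1) > int(s2):
--             if int(e1) <= int(e2):
--                 chunk = int(e1) - int(s1)
--             elif int(e1) > int(e2):
--                 chunk = int(e2) - int(s1)
--         chunk_list.append(chunk)
--     return(chunk_list)
-- ===== SOURCE B (Python) =====
-- def get_overlap(groupby_list):
--     ## overlap = sum of the two interval lengths minus the length of the
--     ## enclosing span: (e1-s1) + (e2-s2) - (max(e1,e2) - min(s1,s2));
--     ## built recursively, so negative overlaps fall out unchanged.
--     if not groupby_list:
--         return []
--     s1, e1, s2, e2 = (int(v) for v in groupby_list[0][:4])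
--     span = max(e1, e2) - min(s1, s2)
--     return [(e1 - s1) + (e2 - s2) - span] + get_overlap(groupby_list[1:])
-- ===== Notes on version B (the rewrite author's own statement) =====
-- stated objective: alternative
-- what changed: Replaces the four-way branch cascade with the inclusion-exclusion identity overlap = (e1-s1)+(e2-s2) - (max(e1,e2)-min(s1,s2)) (lengths minus enclosing span), computed by structural recursion instead of an accumulating loop.
import Mathlib
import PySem

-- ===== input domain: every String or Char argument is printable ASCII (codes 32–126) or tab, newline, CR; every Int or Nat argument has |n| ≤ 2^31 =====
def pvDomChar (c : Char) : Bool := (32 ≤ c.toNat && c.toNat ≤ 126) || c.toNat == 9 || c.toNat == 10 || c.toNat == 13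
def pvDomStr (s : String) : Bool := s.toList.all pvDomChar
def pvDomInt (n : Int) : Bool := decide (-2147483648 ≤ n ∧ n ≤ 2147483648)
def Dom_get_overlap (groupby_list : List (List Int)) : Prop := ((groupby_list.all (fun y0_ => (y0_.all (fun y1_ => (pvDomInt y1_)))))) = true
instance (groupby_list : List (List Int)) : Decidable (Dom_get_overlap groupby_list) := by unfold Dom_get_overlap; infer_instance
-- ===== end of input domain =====

-- B replaces A's branch cascade with the inclusion-exclusion identity (e1-s1)+(e2-s2)-(max(e1,e2)-min(s1,s2)), built by structural recursion; same cost, different derivation.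


-- ===== PORT A =====
-- pos_list[i] → (PySem.List.pyGet? …).getD 0; exact on Pre_ (length ≥ 4, so all four indexings are in range)
def get_overlap (groupby_list : List (List Int)) : List Int :=
  groupby_list.foldl (fun chunk_list pos_list =>
    let s1 : Int := (PySem.List.pyGet? pos_list 0).getD 0
    let e1 : Int := (PySem.List.pyGet? pos_list 1).getD 0
    let s2 : Int := (PySem.List.pyGet? pos_list 2).getD 0
    let e2 : Int := (PySem.List.pyGet? pos_list 3).getD 0
    let _size : Int := e1 - s1
    let chunk : Int := 0
    let chunk : Int :=
      if s1 ≤ s2 then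
        (if e1 ≤ e2 then e1 - s2 else if e1 > e2 then e2 - s2 else chunk)
      else if s1 > s2 then
        (if e1 ≤ e2 then e1 - s1 else if e1 > e2 then e2 - s1 else chunk)
      else chunk
    chunk_list ++ [chunk]) []

-- ===== PORT B =====
-- the 4-unpack of p[:4] → four pyGet? reads; exact on Pre_ (length ≥ 4)
def get_overlap_alt : List (List Int) → List Int
  | [] => []
  | p :: rest =>
    let s1 : Int := (PySem.List.pyGet? p 0).getD 0
    let e1 : Int := (PySem.List.pyGet? p 1).getD 0
    let s2 : Int := (PySem.List.pyGet? p 2).getD 0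
    let e2 : Int := (PySem.List.pyGet? p 3).getD 0
    let span : Int := max e1 e2 - min s1 s2
    ((e1 - s1) + (e2 - s2) - span) :: get_overlap_alt rest

-- ===== PRECONDITION & SPEC =====
-- Pre_ excludes exactly the inputs on which the Python A raises IndexError: an inner list shorter than 4.
def Pre_get_overlap (groupby_list : List (List Int)) : Prop :=
  ∀ p ∈ groupby_list, 4 ≤ p.length
instance (groupby_list : List (List Int)) : Decidable (Pre_get_overlap groupby_list) := by unfold Pre_get_overlap; infer_instance
def pvWitness_get_overlap : List (List Int) := [[0, 5, 3, 9], [2, 4, 6, 8]]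
def Spec_get_overlap (groupby_list : List (List Int)) (out : List Int) : Prop := out = get_overlap_alt groupby_list
instance (groupby_list : List (List Int)) (out : List Int) : Decidable (Spec_get_overlap groupby_list out) := by unfold Spec_get_overlap; infer_instance

-- ===== CLAIM (what is proved, stated in full; the proofs are below) =====
def Claim_equal_get_overlap : Prop := ∀ (groupby_list : List (List Int)), Dom_get_overlap groupby_list → Pre_get_overlap groupby_list → Spec_get_overlap groupby_list (get_overlap groupby_list)

-- ===== LEMMAS AND PROOFS =====
theorem pyGet4 (a b c d : Int) (r : List Int) :
    PySem.List.pyGet? (a :: b :: c :: d :: r) 0 = some a ∧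
    PySem.List.pyGet? (a :: b :: c :: d :: r) 1 = some b ∧
    PySem.List.pyGet? (a :: b :: c :: d :: r) 2 = some c ∧
    PySem.List.pyGet? (a :: b :: c :: d :: r) 3 = some d := by
  refine ⟨?_, ?_, ?_, ?_⟩ <;>
    · simp [PySem.List.pyGet?, PySem.List.pyIdx?]
      rw [if_pos (by omega)]
      simp

theorem get_overlap_foldl (groupby_list : List (List Int)) (acc : List Int)
    (h : ∀ p ∈ groupby_list, 4 ≤ p.length) :
    groupby_list.foldl (fun chunk_list pos_list =>
      let s1 : Int := (PySem.List.pyGet? pos_list 0).getD 0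
      let e1 : Int := (PySem.List.pyGet? pos_list 1).getD 0
      let s2 : Int := (PySem.List.pyGet? pos_list 2).getD 0
      let e2 : Int := (PySem.List.pyGet? pos_list 3).getD 0
      let _size : Int := e1 - s1
      let chunk : Int := 0
      let chunk : Int :=
        if s1 ≤ s2 then
          (if e1 ≤ e2 then e1 - s2 else if e1 > e2 then e2 - s2 else chunk)
        else if s1 > s2 then
          (if e1 ≤ e2 then e1 - s1 else if e1 > e2 then e2 - s1 else chunk)
        else chunk
      chunk_list ++ [chunk]) acc = acc ++ get_overlap_alt groupby_list := by
  induction groupby_list generalizing acc with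
  | nil => simp [get_overlap_alt]
  | cons p t ih =>
    obtain ⟨a, b, c, d, rest, rfl⟩ : ∃ a b c d rest, p = a :: b :: c :: d :: rest := by
      have hp : 4 ≤ p.length := h p (List.mem_cons_self ..)
      match p, hp with
      | a :: b :: c :: d :: rest, _ => exact ⟨a, b, c, d, rest, rfl⟩
    simp only [List.foldl_cons, get_overlap_alt]
    rw [ih _ (fun q hq => h q (List.mem_cons_of_mem _ hq))]
    simp only [(pyGet4 a b c d rest).1, (pyGet4 a b c d rest).2.1,
      (pyGet4 a b c d rest).2.2.1, (pyGet4 a b c d rest).2.2.2, Option.getD_some,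
      List.append_assoc, List.singleton_append, List.cons.injEq, List.append_cancel_left_eq]
    refine ⟨?_, trivial⟩
    simp only [max_def, min_def]
    split_ifs <;> omega

-- ===== VERDICT (by name: the statement is the Claim_ definition above) =====
theorem get_overlap_spec : Claim_equal_get_overlap := by
  intro gl _ hpre
  show get_overlap gl = get_overlap_alt gl
  unfold get_overlap
  rw [get_overlap_foldl gl [] hpre, List.nil_append]
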